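-- pv_equiv track=rewrite | github.com/Codegass/Setup-Agent | tools/bash.py | _get_command_type
-- ===== SOURCE A (Python) =====
-- def _get_command_type(command: str) -> str:
--     """Categorize the command type for better context."""
--     command_lower = command.lower()
--
--     if any(tool in command_lower for tool in ['mvn', 'gradle', 'ant']):
--         return 'build_tool'
--     elif any(pkg in command_lower for pkg in ['apt', 'yum', 'dnf', 'pip', 'npm', 'yarn']):
--         return 'package_manager'
--     elif any(git in command_lower for git in ['git ', 'git-']):
--         return 'version_control'
--     elif any(test in command_lower for test in ['test', 'pytest', 'jest', 'mocha']):
--         return 'testing'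
--     elif any(file_op in command_lower for file_op in ['ls', 'find', 'grep', 'cat', 'head', 'tail']):
--         return 'file_operation'
--     elif any(sys in command_lower for sys in ['ps', 'top', 'df', 'du', 'free']):
--         return 'system_info'
--     elif 'cd ' in command_lower or 'pwd' in command_lower:
--         return 'navigation'
--     elif any(net in command_lower for net in ['curl', 'wget', 'ping', 'netstat']):
--         return 'network'
--     else:
--         return 'general'
-- ===== SOURCE B (Python) =====
-- _KEYWORDS = {
--     'mvn': 0, 'gradle': 0, 'ant': 0,
--     'apt': 1, 'yum': 1, 'dnf': 1, 'pip': 1, 'npm': 1, 'yarn': 1,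
--     'git ': 2, 'git-': 2,
--     'test': 3, 'pytest': 3, 'jest': 3, 'mocha': 3,
--     'ls': 4, 'find': 4, 'grep': 4, 'cat': 4, 'head': 4, 'tail': 4,
--     'ps': 5, 'top': 5, 'df': 5, 'du': 5, 'free': 5,
--     'cd ': 6, 'pwd': 6,
--     'curl': 7, 'wget': 7, 'ping': 7, 'netstat': 7,
-- }
-- _NAMES = ['build_tool', 'package_manager', 'version_control', 'testing',
--           'file_operation', 'system_info', 'navigation', 'network']
--
--
-- def _get_command_type(command: str) -> str:
--     """Single left-to-right scan: at each position, see which keywords start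
--     there (keyword -> priority map) and keep the minimum priority seen."""
--     cl = command.lower()
--     best = len(_NAMES)
--     for i in range(len(cl)):
--         for pat, pri in _KEYWORDS.items():
--             if pri < best and cl.startswith(pat, i):
--                 best = pri
--     return _NAMES[best] if best < len(_NAMES) else 'general'
-- ===== Notes on version B (the rewrite author's own statement) =====
-- stated objective: alternative
-- what changed: Replaces the ordered substring-membership cascade with a single left-to-right scan of the string that, at each position, checks which keywords of a keyword-to-priority map start there and keeps the minimum priority, finally mapping the best priority to its category name.
import Mathlib
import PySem

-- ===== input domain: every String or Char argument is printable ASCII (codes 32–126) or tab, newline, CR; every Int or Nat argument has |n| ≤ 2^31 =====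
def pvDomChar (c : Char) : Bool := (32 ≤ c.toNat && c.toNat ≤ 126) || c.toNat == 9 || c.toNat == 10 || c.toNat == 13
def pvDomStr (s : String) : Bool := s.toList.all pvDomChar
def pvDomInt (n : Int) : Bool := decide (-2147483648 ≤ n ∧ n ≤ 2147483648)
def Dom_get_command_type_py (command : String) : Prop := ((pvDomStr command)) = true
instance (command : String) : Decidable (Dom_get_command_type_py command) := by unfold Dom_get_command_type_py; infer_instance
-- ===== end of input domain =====

-- B replaces the ordered substring-membership cascade by a single positional scan with a
-- keyword→priority map keeping the minimum matched priority (objective: alternative).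
-- ===== PORT A =====
def get_command_type_py (command : String) : String :=
  let command_lower := PySem.Str.lower command
  if ["mvn", "gradle", "ant"].any (fun tool => PySem.Str.isIn tool command_lower) then
    "build_tool"
  else if ["apt", "yum", "dnf", "pip", "npm", "yarn"].any (fun pkg => PySem.Str.isIn pkg command_lower) then
    "package_manager"
  else if ["git ", "git-"].any (fun git => PySem.Str.isIn git command_lower) then
    "version_control"
  else if ["test", "pytest", "jest", "mocha"].any (fun t => PySem.Str.isIn t command_lower) then
    "testing"
  else if ["ls", "find", "grep", "cat", "head", "tail"].any (fun f => PySem.Str.isIn f command_lower) then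
    "file_operation"
  else if ["ps", "top", "df", "du", "free"].any (fun s => PySem.Str.isIn s command_lower) then
    "system_info"
  else if PySem.Str.isIn "cd " command_lower || PySem.Str.isIn "pwd" command_lower then
    "navigation"
  else if ["curl", "wget", "ping", "netstat"].any (fun n => PySem.Str.isIn n command_lower) then
    "network"
  else
    "general"

-- ===== PORT B =====
-- the dict _KEYWORDS (keyword → priority), in insertion order, keys as char lists
def pvKeywords : List (List Char × Nat) :=
  [ ("mvn".toList, 0), ("gradle".toList, 0), ("ant".toList, 0),
    ("apt".toList, 1), ("yum".toList, 1), ("dnf".toList, 1), ("pip".toList, 1), ("npm".toList, 1), ("yarn".toList, 1),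
    ("git ".toList, 2), ("git-".toList, 2),
    ("test".toList, 3), ("pytest".toList, 3), ("jest".toList, 3), ("mocha".toList, 3),
    ("ls".toList, 4), ("find".toList, 4), ("grep".toList, 4), ("cat".toList, 4), ("head".toList, 4), ("tail".toList, 4),
    ("ps".toList, 5), ("top".toList, 5), ("df".toList, 5), ("du".toList, 5), ("free".toList, 5),
    ("cd ".toList, 6), ("pwd".toList, 6),
    ("curl".toList, 7), ("wget".toList, 7), ("ping".toList, 7), ("netstat".toList, 7) ]

def pvNames : List String :=
  ["build_tool", "package_manager", "version_control", "testing",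
   "file_operation", "system_info", "navigation", "network"]

-- cl.startswith(pat, i) is exactly: pat is a prefix of cl dropped by i (0 ≤ i)
def get_command_type_py_alt (command : String) : String :=
  let cl := (PySem.Str.lower command).toList
  let best := (List.range cl.length).foldl
    (fun best i => pvKeywords.foldl
      (fun best pp =>
        if pp.2 < best && PySem.Chars.startswith (cl.drop i) pp.1 then pp.2 else best) best)
    pvNames.length
  if best < pvNames.length then pvNames.getD best "general" else "general"

-- ===== PRECONDITION & SPEC =====
def Spec_get_command_type_py (command : String) (out : String) : Prop := out = get_command_type_py_alt command
instance (command : String) (out : String) : Decidable (Spec_get_command_type_py command out) := by unfold Spec_get_command_type_py; infer_instance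

-- ===== CLAIM (what is proved, stated in full; the proofs are below) =====
def Claim_equal_get_command_type_py : Prop := ∀ (command : String), Dom_get_command_type_py command → Spec_get_command_type_py command (get_command_type_py command)

-- ===== LEMMAS AND PROOFS =====

-- inner fold (over the keyword table) never increases the accumulator
theorem pvInner_le (L : List (List Char × Nat)) (s : List Char) (b : Nat) :
    L.foldl (fun b pp => if pp.2 < b && PySem.Chars.startswith s pp.1 then pp.2 else b) b ≤ b := by
  induction L generalizing b with
  | nil => simp
  | cons x L ih =>
    simp only [List.foldl_cons]
    refine le_trans (ih _) ?_
    split <;> simp_all <;> omega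

theorem pvInner_le_of_mem (L : List (List Char × Nat)) (s : List Char) (b : Nat)
    (pp : List Char × Nat) (hm : pp ∈ L) (hs : PySem.Chars.startswith s pp.1 = true) :
    L.foldl (fun b pp => if pp.2 < b && PySem.Chars.startswith s pp.1 then pp.2 else b) b ≤ pp.2 := by
  induction L generalizing b with
  | nil => cases hm
  | cons x L ih =>
    simp only [List.foldl_cons]
    rcases List.mem_cons.mp hm with h | h
    · subst h
      refine le_trans (pvInner_le _ _ _) ?_
      simp [hs]; split <;> omega
    · exact ih _ h

theorem pvInner_cases (L : List (List Char × Nat)) (s : List Char) (b : Nat) :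
    L.foldl (fun b pp => if pp.2 < b && PySem.Chars.startswith s pp.1 then pp.2 else b) b = b ∨
      ∃ pp ∈ L, PySem.Chars.startswith s pp.1 = true ∧
        L.foldl (fun b pp => if pp.2 < b && PySem.Chars.startswith s pp.1 then pp.2 else b) b = pp.2 := by
  induction L generalizing b with
  | nil => simp
  | cons x L ih =>
    simp only [List.foldl_cons]
    rcases ih (if x.2 < b && PySem.Chars.startswith s x.1 then x.2 else b) with h | ⟨pp, hm, hs, h⟩
    · rw [h]
      by_cases hc : (x.2 < b && PySem.Chars.startswith s x.1) = true
      · right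
        refine ⟨x, List.mem_cons_self .., ?_, by simp [hc]⟩
        have := hc; simp only [Bool.and_eq_true] at this; exact this.2
      · left; simp [hc]
    · right; exact ⟨pp, List.mem_cons_of_mem _ hm, hs, h⟩

-- outer fold (over positions), same three facts
theorem pvOuter_le (cl : List Char) (J : List Nat) (b : Nat) :
    J.foldl (fun b i => pvKeywords.foldl
      (fun b pp => if pp.2 < b && PySem.Chars.startswith (cl.drop i) pp.1 then pp.2 else b) b) b ≤ b := by
  induction J generalizing b with
  | nil => simp
  | cons i J ih =>
    simp only [List.foldl_cons]
    exact le_trans (ih _) (pvInner_le pvKeywords (cl.drop i) b)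

theorem pvOuter_le_of_mem (cl : List Char) (J : List Nat) (b : Nat)
    (i : Nat) (hi : i ∈ J) (pp : List Char × Nat) (hm : pp ∈ pvKeywords)
    (hs : PySem.Chars.startswith (cl.drop i) pp.1 = true) :
    J.foldl (fun b i => pvKeywords.foldl
      (fun b pp => if pp.2 < b && PySem.Chars.startswith (cl.drop i) pp.1 then pp.2 else b) b) b ≤ pp.2 := by
  induction J generalizing b with
  | nil => cases hi
  | cons j J ih =>
    simp only [List.foldl_cons]
    rcases List.mem_cons.mp hi with h | h
    · subst h
      exact le_trans (pvOuter_le _ _ _) (pvInner_le_of_mem _ _ _ _ hm hs)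
    · exact ih _ h

theorem pvOuter_cases (cl : List Char) (J : List Nat) (b : Nat) :
    J.foldl (fun b i => pvKeywords.foldl
      (fun b pp => if pp.2 < b && PySem.Chars.startswith (cl.drop i) pp.1 then pp.2 else b) b) b = b ∨
      ∃ i ∈ J, ∃ pp ∈ pvKeywords, PySem.Chars.startswith (cl.drop i) pp.1 = true ∧
        J.foldl (fun b i => pvKeywords.foldl
          (fun b pp => if pp.2 < b && PySem.Chars.startswith (cl.drop i) pp.1 then pp.2 else b) b) b = pp.2 := by
  induction J generalizing b with
  | nil => simp
  | cons j J ih =>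
    simp only [List.foldl_cons]
    rcases ih (pvKeywords.foldl
        (fun b pp => if pp.2 < b && PySem.Chars.startswith (cl.drop j) pp.1 then pp.2 else b) b) with h | ⟨i, hiJ, pp, hm, hs, h⟩
    · rw [h]
      rcases pvInner_cases pvKeywords (cl.drop j) b with h2 | ⟨pp, hm, hs, h2⟩
      · left; exact h2
      · right; exact ⟨j, by simp, pp, hm, hs, h2⟩
    · right; exact ⟨i, List.mem_cons_of_mem _ hiJ, pp, hm, hs, h⟩

-- "priority p has a matching keyword as a substring of cl"
def pvMatched (cl : List Char) (p : Nat) : Prop :=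
  ∃ pp ∈ pvKeywords, pp.2 = p ∧ PySem.Chars.isIn pp.1 cl = true

-- substring ↔ some in-range position where the keyword starts (keywords are nonempty)
theorem pvMatched_iff_pos (cl : List Char) (p : Nat) :
    pvMatched cl p ↔ ∃ i ∈ List.range cl.length, ∃ pp ∈ pvKeywords, pp.2 = p ∧
      PySem.Chars.startswith (cl.drop i) pp.1 = true := by
  constructor
  · rintro ⟨pp, hm, hp, hin⟩
    obtain ⟨j, hj⟩ := (PySem.Chars.exists_prefix_drop_iff_isIn pp.1 cl).mpr hin
    have hne : pp.1 ≠ [] := by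
      revert hm; unfold pvKeywords; intro hm
      fin_cases hm <;> simp
    have hjlt : j < cl.length := by
      by_contra h
      have : cl.drop j = [] := List.drop_eq_nil_of_le (by omega)
      rw [this] at hj
      exact hne (List.prefix_nil.mp hj)
    exact ⟨j, List.mem_range.mpr hjlt, pp, hm, hp,
      (PySem.Chars.startswith_iff _ _).mpr hj⟩
  · rintro ⟨i, _, pp, hm, hp, hs⟩
    refine ⟨pp, hm, hp, ?_⟩
    exact (PySem.Chars.exists_prefix_drop_iff_isIn pp.1 cl).mp
      ⟨i, (PySem.Chars.startswith_iff _ _).mp hs⟩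

-- the best priority computed by B's scan
def pvBest (cl : List Char) : Nat :=
  (List.range cl.length).foldl
    (fun best i => pvKeywords.foldl
      (fun best pp =>
        if pp.2 < best && PySem.Chars.startswith (cl.drop i) pp.1 then pp.2 else best) best)
    pvNames.length

theorem pvBest_le_of_matched (cl : List Char) (p : Nat) (h : pvMatched cl p) :
    pvBest cl ≤ p := by
  obtain ⟨i, hi, pp, hm, hp, hs⟩ := (pvMatched_iff_pos cl p).mp h
  have h2 := pvOuter_le_of_mem cl (List.range cl.length) pvNames.length i hi pp hm hs
  exact le_of_le_of_eq h2 hp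

theorem pvBest_cases (cl : List Char) :
    pvBest cl = 8 ∨ pvMatched cl (pvBest cl) := by
  rcases pvOuter_cases cl (List.range cl.length) pvNames.length with h | ⟨i, hi, pp, hm, hs, h⟩
  · left; exact h.trans (by decide)
  · right
    rw [pvMatched_iff_pos]
    exact ⟨i, hi, pp, hm, h.symm, hs⟩

theorem pvBest_eq (cl : List Char) (k : Nat) (hk : k < 8) (hmk : pvMatched cl k)
    (hlow : ∀ p < k, ¬ pvMatched cl p) : pvBest cl = k := by
  have h1 := pvBest_le_of_matched cl k hmk
  rcases pvBest_cases cl with h | h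
  · omega
  · by_contra hne
    exact hlow _ (lt_of_le_of_ne h1 hne) h

theorem pvBest_eq_eight (cl : List Char) (hnone : ∀ p, ¬ pvMatched cl p) : pvBest cl = 8 := by
  rcases pvBest_cases cl with h | h
  · exact h
  · exact absurd h (hnone _)

-- pvMatched at each concrete priority level, phrased as A's branch conditions
theorem pvMatched_zero (cl : List Char) :
    pvMatched cl 0 ↔ (PySem.Chars.isIn "mvn".toList cl = true ∨
      PySem.Chars.isIn "gradle".toList cl = true ∨ PySem.Chars.isIn "ant".toList cl = true) := by
  unfold pvMatched pvKeywords
  constructor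
  · rintro ⟨pp, hm, hp, hin⟩
    fin_cases hm <;> simp_all
  · rintro (h | h | h)
    · exact ⟨("mvn".toList, 0), by simp, rfl, h⟩
    · exact ⟨("gradle".toList, 0), by simp, rfl, h⟩
    · exact ⟨("ant".toList, 0), by simp, rfl, h⟩

theorem pvMatched_one (cl : List Char) :
    pvMatched cl 1 ↔ (PySem.Chars.isIn "apt".toList cl = true ∨
      PySem.Chars.isIn "yum".toList cl = true ∨ PySem.Chars.isIn "dnf".toList cl = true ∨
      PySem.Chars.isIn "pip".toList cl = true ∨ PySem.Chars.isIn "npm".toList cl = true ∨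
      PySem.Chars.isIn "yarn".toList cl = true) := by
  unfold pvMatched pvKeywords
  constructor
  · rintro ⟨pp, hm, hp, hin⟩
    fin_cases hm <;> simp_all
  · rintro (h | h | h | h | h | h)
    · exact ⟨("apt".toList, 1), by simp, rfl, h⟩
    · exact ⟨("yum".toList, 1), by simp, rfl, h⟩
    · exact ⟨("dnf".toList, 1), by simp, rfl, h⟩
    · exact ⟨("pip".toList, 1), by simp, rfl, h⟩
    · exact ⟨("npm".toList, 1), by simp, rfl, h⟩
    · exact ⟨("yarn".toList, 1), by simp, rfl, h⟩

theorem pvMatched_two (cl : List Char) :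
    pvMatched cl 2 ↔ (PySem.Chars.isIn "git ".toList cl = true ∨
      PySem.Chars.isIn "git-".toList cl = true) := by
  unfold pvMatched pvKeywords
  constructor
  · rintro ⟨pp, hm, hp, hin⟩
    fin_cases hm <;> simp_all
  · rintro (h | h)
    · exact ⟨("git ".toList, 2), by simp, rfl, h⟩
    · exact ⟨("git-".toList, 2), by simp, rfl, h⟩

theorem pvMatched_three (cl : List Char) :
    pvMatched cl 3 ↔ (PySem.Chars.isIn "test".toList cl = true ∨
      PySem.Chars.isIn "pytest".toList cl = true ∨ PySem.Chars.isIn "jest".toList cl = true ∨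
      PySem.Chars.isIn "mocha".toList cl = true) := by
  unfold pvMatched pvKeywords
  constructor
  · rintro ⟨pp, hm, hp, hin⟩
    fin_cases hm <;> simp_all
  · rintro (h | h | h | h)
    · exact ⟨("test".toList, 3), by simp, rfl, h⟩
    · exact ⟨("pytest".toList, 3), by simp, rfl, h⟩
    · exact ⟨("jest".toList, 3), by simp, rfl, h⟩
    · exact ⟨("mocha".toList, 3), by simp, rfl, h⟩

theorem pvMatched_four (cl : List Char) :
    pvMatched cl 4 ↔ (PySem.Chars.isIn "ls".toList cl = true ∨
      PySem.Chars.isIn "find".toList cl = true ∨ PySem.Chars.isIn "grep".toList cl = true ∨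
      PySem.Chars.isIn "cat".toList cl = true ∨ PySem.Chars.isIn "head".toList cl = true ∨
      PySem.Chars.isIn "tail".toList cl = true) := by
  unfold pvMatched pvKeywords
  constructor
  · rintro ⟨pp, hm, hp, hin⟩
    fin_cases hm <;> simp_all
  · rintro (h | h | h | h | h | h)
    · exact ⟨("ls".toList, 4), by simp, rfl, h⟩
    · exact ⟨("find".toList, 4), by simp, rfl, h⟩
    · exact ⟨("grep".toList, 4), by simp, rfl, h⟩
    · exact ⟨("cat".toList, 4), by simp, rfl, h⟩
    · exact ⟨("head".toList, 4), by simp, rfl, h⟩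
    · exact ⟨("tail".toList, 4), by simp, rfl, h⟩

theorem pvMatched_five (cl : List Char) :
    pvMatched cl 5 ↔ (PySem.Chars.isIn "ps".toList cl = true ∨
      PySem.Chars.isIn "top".toList cl = true ∨ PySem.Chars.isIn "df".toList cl = true ∨
      PySem.Chars.isIn "du".toList cl = true ∨ PySem.Chars.isIn "free".toList cl = true) := by
  unfold pvMatched pvKeywords
  constructor
  · rintro ⟨pp, hm, hp, hin⟩
    fin_cases hm <;> simp_all
  · rintro (h | h | h | h | h)
    · exact ⟨("ps".toList, 5), by simp, rfl, h⟩
    · exact ⟨("top".toList, 5), by simp, rfl, h⟩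
    · exact ⟨("df".toList, 5), by simp, rfl, h⟩
    · exact ⟨("du".toList, 5), by simp, rfl, h⟩
    · exact ⟨("free".toList, 5), by simp, rfl, h⟩

theorem pvMatched_six (cl : List Char) :
    pvMatched cl 6 ↔ (PySem.Chars.isIn "cd ".toList cl = true ∨
      PySem.Chars.isIn "pwd".toList cl = true) := by
  unfold pvMatched pvKeywords
  constructor
  · rintro ⟨pp, hm, hp, hin⟩
    fin_cases hm <;> simp_all
  · rintro (h | h)
    · exact ⟨("cd ".toList, 6), by simp, rfl, h⟩
    · exact ⟨("pwd".toList, 6), by simp, rfl, h⟩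

theorem pvMatched_seven (cl : List Char) :
    pvMatched cl 7 ↔ (PySem.Chars.isIn "curl".toList cl = true ∨
      PySem.Chars.isIn "wget".toList cl = true ∨ PySem.Chars.isIn "ping".toList cl = true ∨
      PySem.Chars.isIn "netstat".toList cl = true) := by
  unfold pvMatched pvKeywords
  constructor
  · rintro ⟨pp, hm, hp, hin⟩
    fin_cases hm <;> simp_all
  · rintro (h | h | h | h)
    · exact ⟨("curl".toList, 7), by simp, rfl, h⟩
    · exact ⟨("wget".toList, 7), by simp, rfl, h⟩
    · exact ⟨("ping".toList, 7), by simp, rfl, h⟩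
    · exact ⟨("netstat".toList, 7), by simp, rfl, h⟩

theorem pvMatched_big (cl : List Char) (p : Nat) (hp : 8 ≤ p) : ¬ pvMatched cl p := by
  rintro ⟨pp, hm, hpp, _⟩
  revert hm; unfold pvKeywords; intro hm
  fin_cases hm <;> omega

theorem pvMain (cl : List Char) :
    (if PySem.Chars.isIn "mvn".toList cl || (PySem.Chars.isIn "gradle".toList cl || (PySem.Chars.isIn "ant".toList cl)) then "build_tool"
     else if PySem.Chars.isIn "apt".toList cl || (PySem.Chars.isIn "yum".toList cl || (PySem.Chars.isIn "dnf".toList cl || (PySem.Chars.isIn "pip".toList cl || (PySem.Chars.isIn "npm".toList cl || (PySem.Chars.isIn "yarn".toList cl))))) then "package_manager"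
     else if PySem.Chars.isIn "git ".toList cl || (PySem.Chars.isIn "git-".toList cl) then "version_control"
     else if PySem.Chars.isIn "test".toList cl || (PySem.Chars.isIn "pytest".toList cl || (PySem.Chars.isIn "jest".toList cl || (PySem.Chars.isIn "mocha".toList cl))) then "testing"
     else if PySem.Chars.isIn "ls".toList cl || (PySem.Chars.isIn "find".toList cl || (PySem.Chars.isIn "grep".toList cl || (PySem.Chars.isIn "cat".toList cl || (PySem.Chars.isIn "head".toList cl || (PySem.Chars.isIn "tail".toList cl))))) then "file_operation"
     else if PySem.Chars.isIn "ps".toList cl || (PySem.Chars.isIn "top".toList cl || (PySem.Chars.isIn "df".toList cl || (PySem.Chars.isIn "du".toList cl || (PySem.Chars.isIn "free".toList cl)))) then "system_info"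
     else if PySem.Chars.isIn "cd ".toList cl || (PySem.Chars.isIn "pwd".toList cl) then "navigation"
     else if PySem.Chars.isIn "curl".toList cl || (PySem.Chars.isIn "wget".toList cl || (PySem.Chars.isIn "ping".toList cl || (PySem.Chars.isIn "netstat".toList cl))) then "network"
     else "general")
    = (if pvBest cl < pvNames.length then pvNames.getD (pvBest cl) "general" else "general") := by
  by_cases h0 : (PySem.Chars.isIn "mvn".toList cl || (PySem.Chars.isIn "gradle".toList cl || (PySem.Chars.isIn "ant".toList cl))) = true
  · have hb := pvBest_eq cl 0 (by omega) ((pvMatched_zero cl).mpr (by simpa [or_assoc] using h0)) (by omega)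
    rw [if_pos h0, hb]
    simp [pvNames]
  rw [Bool.not_eq_true] at h0
  have n0 : ¬ pvMatched cl 0 := by
    rw [pvMatched_zero]
    intro hcon
    rcases hcon with h | h | h <;> simp_all
  rw [if_neg (by rw [h0]; exact Bool.false_ne_true)]
  by_cases h1 : (PySem.Chars.isIn "apt".toList cl || (PySem.Chars.isIn "yum".toList cl || (PySem.Chars.isIn "dnf".toList cl || (PySem.Chars.isIn "pip".toList cl || (PySem.Chars.isIn "npm".toList cl || (PySem.Chars.isIn "yarn".toList cl)))))) = true
  · have hb := pvBest_eq cl 1 (by omega) ((pvMatched_one cl).mpr (by simpa [or_assoc] using h1))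
      (by intro p hp; interval_cases p <;> assumption)
    rw [if_pos h1, hb]
    simp [pvNames]
  rw [Bool.not_eq_true] at h1
  have n1 : ¬ pvMatched cl 1 := by
    rw [pvMatched_one]
    intro hcon
    rcases hcon with h | h | h | h | h | h <;> simp_all
  rw [if_neg (by rw [h1]; exact Bool.false_ne_true)]
  by_cases h2 : (PySem.Chars.isIn "git ".toList cl || (PySem.Chars.isIn "git-".toList cl)) = true
  · have hb := pvBest_eq cl 2 (by omega) ((pvMatched_two cl).mpr (by simpa [or_assoc] using h2))
      (by intro p hp; interval_cases p <;> assumption)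
    rw [if_pos h2, hb]
    simp [pvNames]
  rw [Bool.not_eq_true] at h2
  have n2 : ¬ pvMatched cl 2 := by
    rw [pvMatched_two]
    intro hcon
    rcases hcon with h | h <;> simp_all
  rw [if_neg (by rw [h2]; exact Bool.false_ne_true)]
  by_cases h3 : (PySem.Chars.isIn "test".toList cl || (PySem.Chars.isIn "pytest".toList cl || (PySem.Chars.isIn "jest".toList cl || (PySem.Chars.isIn "mocha".toList cl)))) = true
  · have hb := pvBest_eq cl 3 (by omega) ((pvMatched_three cl).mpr (by simpa [or_assoc] using h3))
      (by intro p hp; interval_cases p <;> assumption)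
    rw [if_pos h3, hb]
    simp [pvNames]
  rw [Bool.not_eq_true] at h3
  have n3 : ¬ pvMatched cl 3 := by
    rw [pvMatched_three]
    intro hcon
    rcases hcon with h | h | h | h <;> simp_all
  rw [if_neg (by rw [h3]; exact Bool.false_ne_true)]
  by_cases h4 : (PySem.Chars.isIn "ls".toList cl || (PySem.Chars.isIn "find".toList cl || (PySem.Chars.isIn "grep".toList cl || (PySem.Chars.isIn "cat".toList cl || (PySem.Chars.isIn "head".toList cl || (PySem.Chars.isIn "tail".toList cl)))))) = true
  · have hb := pvBest_eq cl 4 (by omega) ((pvMatched_four cl).mpr (by simpa [or_assoc] using h4))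
      (by intro p hp; interval_cases p <;> assumption)
    rw [if_pos h4, hb]
    simp [pvNames]
  rw [Bool.not_eq_true] at h4
  have n4 : ¬ pvMatched cl 4 := by
    rw [pvMatched_four]
    intro hcon
    rcases hcon with h | h | h | h | h | h <;> simp_all
  rw [if_neg (by rw [h4]; exact Bool.false_ne_true)]
  by_cases h5 : (PySem.Chars.isIn "ps".toList cl || (PySem.Chars.isIn "top".toList cl || (PySem.Chars.isIn "df".toList cl || (PySem.Chars.isIn "du".toList cl || (PySem.Chars.isIn "free".toList cl))))) = true
  · have hb := pvBest_eq cl 5 (by omega) ((pvMatched_five cl).mpr (by simpa [or_assoc] using h5))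
      (by intro p hp; interval_cases p <;> assumption)
    rw [if_pos h5, hb]
    simp [pvNames]
  rw [Bool.not_eq_true] at h5
  have n5 : ¬ pvMatched cl 5 := by
    rw [pvMatched_five]
    intro hcon
    rcases hcon with h | h | h | h | h <;> simp_all
  rw [if_neg (by rw [h5]; exact Bool.false_ne_true)]
  by_cases h6 : (PySem.Chars.isIn "cd ".toList cl || (PySem.Chars.isIn "pwd".toList cl)) = true
  · have hb := pvBest_eq cl 6 (by omega) ((pvMatched_six cl).mpr (by simpa [or_assoc] using h6))
      (by intro p hp; interval_cases p <;> assumption)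
    rw [if_pos h6, hb]
    simp [pvNames]
  rw [Bool.not_eq_true] at h6
  have n6 : ¬ pvMatched cl 6 := by
    rw [pvMatched_six]
    intro hcon
    rcases hcon with h | h <;> simp_all
  rw [if_neg (by rw [h6]; exact Bool.false_ne_true)]
  by_cases h7 : (PySem.Chars.isIn "curl".toList cl || (PySem.Chars.isIn "wget".toList cl || (PySem.Chars.isIn "ping".toList cl || (PySem.Chars.isIn "netstat".toList cl)))) = true
  · have hb := pvBest_eq cl 7 (by omega) ((pvMatched_seven cl).mpr (by simpa [or_assoc] using h7))
      (by intro p hp; interval_cases p <;> assumption)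
    rw [if_pos h7, hb]
    simp [pvNames]
  rw [Bool.not_eq_true] at h7
  have n7 : ¬ pvMatched cl 7 := by
    rw [pvMatched_seven]
    intro hcon
    rcases hcon with h | h | h | h <;> simp_all
  rw [if_neg (by rw [h7]; exact Bool.false_ne_true)]
  have hb := pvBest_eq_eight cl (by
    intro p
    rcases Nat.lt_or_ge p 8 with hp | hp
    · interval_cases p <;> assumption
    · exact pvMatched_big cl p hp)
  rw [hb]
  simp [pvNames]

-- ===== VERDICT (by name: the statement is the Claim_ definition above) =====
theorem get_command_type_py_spec : Claim_equal_get_command_type_py := by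
  intro command _
  unfold Spec_get_command_type_py get_command_type_py get_command_type_py_alt
  simp only [List.any_cons, List.any_nil, Bool.or_false, PySem.Str.isIn_eq,
    PySem.Str.toList_lower]
  exact pvMain (PySem.Chars.lower command.toList)
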